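-- pv_equiv track=rewrite | github.com/ratislavka/KBTU | 4.Fourth_Sem/Web-Dev/Lab7/Task1/3. codingbat/list2/sum13.py | sum13
-- ===== SOURCE A (Python) =====
-- def sum13(nums):
--     sum = 0
--     was = False
--     for i in nums:
--         if was:
--             was = False
--             continue
--         if i != 13:
--             sum += i
--         else:
--             was = True
--             continue
--     return sum
-- ===== SOURCE B (Python) =====
-- def sum13(nums):
--     total = 0
--     i = 0
--     n = len(nums)
--     while i < n:
--         if nums[i] == 13:
--             i += 2
--         else:
--             total += nums[i]
--             i += 1
--     return total
-- ===== Notes on version B (the rewrite author's own statement) =====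
-- stated objective: alternative
-- what changed: Replaces the for-each loop carrying a 'skip next' boolean flag with an index-driven while loop that jumps the index by 2 at each 13, so no flag state is carried.
import Mathlib
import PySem

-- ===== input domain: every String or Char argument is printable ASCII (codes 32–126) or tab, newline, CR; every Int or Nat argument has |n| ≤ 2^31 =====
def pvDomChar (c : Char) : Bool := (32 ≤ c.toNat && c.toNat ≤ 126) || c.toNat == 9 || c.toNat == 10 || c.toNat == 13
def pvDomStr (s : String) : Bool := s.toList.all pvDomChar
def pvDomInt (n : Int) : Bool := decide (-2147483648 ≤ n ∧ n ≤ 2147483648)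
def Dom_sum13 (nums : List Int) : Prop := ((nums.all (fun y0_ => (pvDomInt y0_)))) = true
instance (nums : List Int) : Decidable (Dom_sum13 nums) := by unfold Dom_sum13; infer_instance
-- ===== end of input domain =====

-- B replaces A's for-each loop with a carried skip-flag by an index-driven while loop
-- that jumps the index by 2 at each 13 (alternative decomposition, same cost).

-- ===== PORT A =====
-- the body of A's for-loop, folded over the list with state (sum, was)
def pvStep (st : Int × Bool) (i : Int) : Int × Bool :=
  if st.2 then (st.1, false)
  else if i ≠ 13 then (st.1 + i, st.2)
  else (st.1, true)

def sum13 (nums : List Int) : Int :=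
  (nums.foldl pvStep (0, false)).1

-- ===== PORT B =====
-- B's while loop: index i, running total; nums[i] is always in range when read
def sum13AltGo (nums : List Int) (i : Nat) (total : Int) : Int :=
  if _h : i < nums.length then
    if nums.getD i 0 = 13 then sum13AltGo nums (i + 2) total
    else sum13AltGo nums (i + 1) (total + nums.getD i 0)
  else total
termination_by nums.length - i

def sum13_alt (nums : List Int) : Int := sum13AltGo nums 0 0

-- ===== PRECONDITION & SPEC =====
def Spec_sum13 (nums : List Int) (out : Int) : Prop := out = sum13_alt nums
instance (nums : List Int) (out : Int) : Decidable (Spec_sum13 nums out) := by unfold Spec_sum13; infer_instance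

-- ===== CLAIM (what is proved, stated in full; the proofs are below) =====
def Claim_equal_sum13 : Prop := ∀ (nums : List Int), Dom_sum13 nums → Spec_sum13 nums (sum13 nums)

-- ===== LEMMAS AND PROOFS =====

-- ===== VERDICT (by name: the statement is the Claim_ definition above) =====
-- after a 13 the flag-run over l skips exactly l's head
theorem pvFoldl_true (l : List Int) (s : Int) :
    (List.foldl pvStep (s, true) l).1 = (List.foldl pvStep (s, false) l.tail).1 := by
  cases l with
  | nil => simp [List.foldl]
  | cons x rest => simp [List.foldl, pvStep]

-- B's loop from index i computes A's fold over the suffix nums.drop i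
theorem pvGo_eq_foldl (nums : List Int) (k i : Nat) (total : Int)
    (hk : nums.length - i ≤ k) :
    sum13AltGo nums i total = (List.foldl pvStep (total, false) (nums.drop i)).1 := by
  induction k generalizing i total with
  | zero =>
    have hge : nums.length ≤ i := by omega
    rw [sum13AltGo]
    simp [Nat.not_lt_of_le hge, List.drop_eq_nil_of_le hge]
  | succ k ih =>
    by_cases h : i < nums.length
    · have hdrop : nums.drop i = nums[i] :: nums.drop (i + 1) :=
        List.drop_eq_getElem_cons h
      have hget : nums.getD i 0 = nums[i] := List.getD_eq_getElem nums 0 h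
      rw [sum13AltGo]
      by_cases h13 : nums[i] = (13 : Int)
      · have h2 : nums.length - (i + 2) ≤ k := by omega
        simp only [h, dif_pos, hget, h13, if_pos]
        rw [ih (i + 2) total h2, hdrop]
        simp only [List.foldl, pvStep, h13]
        norm_num
        rw [pvFoldl_true]
        simp [List.tail_drop]
      · have h1 : nums.length - (i + 1) ≤ k := by omega
        simp only [h, dif_pos, hget, h13, if_false]
        rw [ih (i + 1) (total + nums[i]) h1, hdrop]
        simp [List.foldl, pvStep, h13]
    · rw [sum13AltGo]
      simp [h, List.drop_eq_nil_of_le (Nat.le_of_not_lt h)]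

theorem sum13_spec : Claim_equal_sum13 := by
  intro nums _
  unfold Spec_sum13 sum13 sum13_alt
  rw [pvGo_eq_foldl nums nums.length 0 0 (by omega)]
  simp
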